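-- pv_equiv track=rewrite | github.com/StevenDavidsonPlus/Projects | Python/Numbers/fib_seq.py | fibSeqToNth
-- ===== SOURCE A (Python) =====
-- def fibSeqToNth(n):
--     """Returns the Fibonacci sequences to the nth entry as a list of
--        integers."""
--     if not isinstance(n, int) or n < 0:
--         raise TypeError('n should be a positive integer.')
--         return None
--     if n < 0:
--         raise ValueError('n should be a positive integer.')
--         return None
--     result = [0, 1]
--     if n < 2:
--         return result[:n+1]
--     for i in range(1, n):
--         result.append(result[i]+result[i-1])
--     return result
-- ===== SOURCE B (Python) =====
-- def fibSeqToNth(n):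
--     """Returns the Fibonacci sequences to the nth entry as a list of
--        integers."""
--     if not isinstance(n, int) or n < 0:
--         raise TypeError('n should be a positive integer.')
--     return _fibs(n)
--
--
-- def _fibs(k):
--     """The Fibonacci numbers up to index k as a list, by recursive length-doubling:
--        build the list up to just past the halfway index, then extend it in one
--        pass with the Fibonacci addition identity."""
--     if k < 3:
--         return [0, 1, 1][:k + 1]
--     m = k // 2
--     L = _fibs(m + 1)
--     a, b = L[m], L[m + 1]
--     for i in range(k - m - 1):
--         L.append(L[i + 2] * b + L[i + 1] * a)
--     return L
-- ===== Notes on version B (the rewrite author's own statement) =====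
-- stated objective: alternative
-- what changed: Replaces A's single additive pass (each new entry the sum of the two previous list entries) with a recursive length-doubling construction: build the prefix up to half the target index, then extend it in one multiplicative pass via the Fibonacci addition identity; trades cheap additions for fewer but larger multiplications, so it is not faster.
import Mathlib
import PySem

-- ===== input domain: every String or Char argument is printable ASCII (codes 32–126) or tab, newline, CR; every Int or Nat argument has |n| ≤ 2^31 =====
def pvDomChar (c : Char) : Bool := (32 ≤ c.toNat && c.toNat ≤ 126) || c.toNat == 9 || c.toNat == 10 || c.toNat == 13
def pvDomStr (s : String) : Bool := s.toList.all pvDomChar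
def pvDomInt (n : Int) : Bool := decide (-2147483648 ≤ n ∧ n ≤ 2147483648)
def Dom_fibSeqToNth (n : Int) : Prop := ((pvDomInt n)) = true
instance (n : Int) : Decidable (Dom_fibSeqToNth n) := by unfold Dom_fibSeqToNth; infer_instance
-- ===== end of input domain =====

-- B replaces A's single additive index loop with a recursive length-doubling
-- construction: build the prefix up to half the target index, then extend it in
-- one multiplicative pass via the Fibonacci addition identity (objective:
-- alternative algorithm; not faster). Both A and B raise TypeError for negative
-- n; Pre_ excludes those inputs.

-- ===== PORT A =====
def fibSeqToNth (n : Int) : List Int :=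
  if n < 0 then []   -- Python raises TypeError here (outside Pre_)
  else
    let result : List Int := [0, 1]
    if n < 2 then PySem.List.slice result none (some (n + 1))
    else
      (PySem.List.pyRange 1 n 1).foldl
        (fun res i => res ++ [PySem.List.pyGetD res i 0 + PySem.List.pyGetD res (i - 1) 0])
        result

-- ===== PORT B =====
-- _fibs: the Fibonacci prefix up to index k by recursive doubling (k nonnegative whenever called)
def pvFibsB (k : Int) : List Int :=
  if h : k < 3 then PySem.List.slice [0, 1, 1] none (some (k + 1))
  else
    let m := PySem.Int.floordiv k 2
    let L := pvFibsB (m + 1)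
    let a := PySem.List.pyGetD L m 0
    let b := PySem.List.pyGetD L (m + 1) 0
    (PySem.List.pyRange 0 (k - m - 1) 1).foldl
      (fun L i =>
        L ++ [PySem.List.pyGetD L (i + 2) 0 * b + PySem.List.pyGetD L (i + 1) 0 * a]) L
termination_by k.toNat
decreasing_by
  have h2 : PySem.Int.floordiv k 2 = k / 2 := PySem.Int.floordiv_eq_ediv_of_pos (by omega)
  simp only [h2]
  omega

def fibSeqToNth_alt (n : Int) : List Int :=
  if n < 0 then []   -- Python raises TypeError here (outside Pre_)
  else pvFibsB n

-- ===== PRECONDITION & SPEC =====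
-- Pre_ excludes negative n, where the Python A raises TypeError (B does too).
def Pre_fibSeqToNth (n : Int) : Prop := 0 ≤ n
instance (n : Int) : Decidable (Pre_fibSeqToNth n) := by unfold Pre_fibSeqToNth; infer_instance
def pvWitness_fibSeqToNth : Int := (5)

def Spec_fibSeqToNth (n : Int) (out : List Int) : Prop := out = fibSeqToNth_alt n
instance (n : Int) (out : List Int) : Decidable (Spec_fibSeqToNth n out) := by unfold Spec_fibSeqToNth; infer_instance

-- ===== CLAIM (what is proved, stated in full; the proofs are below) =====
def Claim_equal_fibSeqToNth : Prop := ∀ (n : Int), Dom_fibSeqToNth n → Pre_fibSeqToNth n → Spec_fibSeqToNth n (fibSeqToNth n)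

-- ===== LEMMAS AND PROOFS =====

def pvFib : Nat → Int
  | 0 => 0
  | 1 => 1
  | k + 2 => pvFib (k + 1) + pvFib k

def pvFibs (k : Nat) : List Int := (List.range k).map pvFib

theorem pvFibs_succ (k : Nat) : pvFibs (k + 1) = pvFibs k ++ [pvFib k] := by
  simp [pvFibs, List.range_succ]

theorem pvFib_eq_fib (k : Nat) : pvFib k = (Nat.fib k : Int) := by
  induction k using Nat.strong_induction_on with
  | _ k ih =>
    match k with
    | 0 => rfl
    | 1 => rfl
    | k + 2 =>
      rw [pvFib, ih (k + 1) (by omega), ih k (by omega), Nat.fib_add_two]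
      push_cast; ring

-- the doubling identity B relies on
theorem pvFib_add (m i : Nat) :
    pvFib (m + i + 2) = pvFib (i + 2) * pvFib (m + 1) + pvFib (i + 1) * pvFib m := by
  have h := Nat.fib_add m (i + 1)
  simp only [pvFib_eq_fib]
  have : m + i + 2 = m + (i + 1) + 1 := by omega
  rw [this]
  push_cast [h]; ring

theorem pvFibs_getD (j N : Nat) (hj : j < N) : (pvFibs N).getD j 0 = pvFib j := by
  simp [pvFibs, List.getD, hj]

-- B's extension loop: t appends extend the Fibonacci prefix by t entries
theorem bLoop (m t : Nat) (hm : 1 ≤ m) :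
    (PySem.List.pyRange 0 (t : Int) 1).foldl
      (fun L i =>
        L ++ [PySem.List.pyGetD L (i + 2) 0 * pvFib (m + 1) +
              PySem.List.pyGetD L (i + 1) 0 * pvFib m]) (pvFibs (m + 2))
      = pvFibs (m + 2 + t) := by
  induction t with
  | zero => simp [PySem.List.pyRange_one_eq_nil]
  | succ t ih =>
    have hc : ((t + 1 : Nat) : Int) = (t : Int) + 1 := by push_cast; ring
    rw [hc, PySem.List.pyRange_one_succ_right (by positivity), List.foldl_append, ih]
    simp only [List.foldl_cons, List.foldl_nil]
    have h2 : ((t : Int) + 2) = ((t + 2 : Nat) : Int) := by push_cast; ring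
    have h1 : ((t : Int) + 1) = ((t + 1 : Nat) : Int) := by push_cast; ring
    rw [h2, h1, PySem.List.pyGetD_natCast, PySem.List.pyGetD_natCast,
      pvFibs_getD _ _ (by omega), pvFibs_getD _ _ (by omega)]
    rw [show m + 2 + (t + 1) = (m + 2 + t) + 1 by omega, pvFibs_succ]
    rw [show m + 2 + t = m + t + 2 by omega, pvFib_add]

-- B's helper builds exactly the Fibonacci prefix up to index k
theorem pvFibsB_eq (k : Nat) : pvFibsB (k : Int) = pvFibs (k + 1) := by
  induction k using Nat.strong_induction_on with
  | _ k ih =>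
    rcases Nat.lt_or_ge k 3 with hk | hk
    · interval_cases k <;> (rw [pvFibsB]; decide)
    · rw [pvFibsB, dif_neg (by exact_mod_cast Nat.not_lt.mpr hk)]
      have hfd : PySem.Int.floordiv (k : Int) 2 = ((k / 2 : Nat) : Int) := by
        exact_mod_cast PySem.Int.floordiv_natCast k 2
      set M : Nat := k / 2 with hM
      have hM1 : 1 ≤ M := by omega
      have hMk : M + 1 < k := by omega
      simp only [hfd]
      have hIH : pvFibsB ((M : Int) + 1) = pvFibs (M + 2) := by
        have : ((M : Int) + 1) = ((M + 1 : Nat) : Int) := by push_cast; ring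
        rw [this, ih (M + 1) hMk]
      rw [hIH]
      have ha : PySem.List.pyGetD (pvFibs (M + 2)) (M : Int) 0 = pvFib M := by
        rw [PySem.List.pyGetD_natCast, pvFibs_getD _ _ (by omega)]
      have hb : PySem.List.pyGetD (pvFibs (M + 2)) ((M : Int) + 1) 0 = pvFib (M + 1) := by
        rw [show ((M : Int) + 1) = ((M + 1 : Nat) : Int) by push_cast; ring,
          PySem.List.pyGetD_natCast, pvFibs_getD _ _ (by omega)]
      rw [ha, hb]
      have ht : (k : Int) - (M : Int) - 1 = ((k - M - 1 : Nat) : Int) := by omega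
      rw [ht, bLoop M (k - M - 1) hM1]
      congr 1
      omega

-- A's loop, after processing its range up to j, has accumulated the prefix of length j plus one.
theorem aFold (j : Nat) (hj : 1 ≤ j) :
    (PySem.List.pyRange 1 (j : Int) 1).foldl
      (fun res i => res ++ [PySem.List.pyGetD res i 0 + PySem.List.pyGetD res (i - 1) 0])
      ([0, 1] : List Int) = pvFibs (j + 1) := by
  induction j with
  | zero => omega
  | succ m ih =>
    rcases Nat.lt_or_ge m 1 with hm | hm
    · interval_cases m
      rw [PySem.List.pyRange_one_eq_nil (by norm_num)]
      simp [pvFibs, List.range_succ, pvFib]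
    · have hcast : ((m + 1 : Nat) : Int) = (m : Int) + 1 := by push_cast; ring
      rw [hcast, PySem.List.pyRange_one_succ_right (by exact_mod_cast hm),
        List.foldl_append, ih hm]
      simp only [List.foldl_cons, List.foldl_nil]
      have h1 : PySem.List.pyGetD (pvFibs (m + 1)) (m : Int) 0 = pvFib m := by
        rw [PySem.List.pyGetD_natCast]
        simp [pvFibs, List.getD]
      have h2 : PySem.List.pyGetD (pvFibs (m + 1)) ((m : Int) - 1) 0 = pvFib (m - 1) := by
        have : ((m : Int) - 1) = ((m - 1 : Nat) : Int) := by omega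
        rw [this, PySem.List.pyGetD_natCast]
        have : m - 1 < m + 1 := by omega
        simp [pvFibs, List.getD, this]
      rw [h1, h2, pvFibs_succ (m + 1)]
      congr 2
      rcases Nat.exists_eq_add_of_le hm with ⟨k, rfl⟩
      simp [Nat.add_comm 1 k, pvFib]

-- ===== VERDICT (by name: the statement is the Claim_ definition above) =====
theorem fibSeqToNth_spec : Claim_equal_fibSeqToNth := by
  intro n _ hpre
  unfold Spec_fibSeqToNth fibSeqToNth fibSeqToNth_alt
  obtain ⟨m, rfl⟩ : ∃ m : Nat, n = (m : Int) := ⟨n.toNat, (Int.toNat_of_nonneg hpre).symm⟩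
  rw [if_neg (show ¬((m : Int) < 0) by omega), if_neg (show ¬((m : Int) < 0) by omega),
    pvFibsB_eq]
  rcases Nat.lt_or_ge m 2 with hm | hm
  · interval_cases m <;> decide
  · rw [if_neg (show ¬((m : Int) < 2) by omega), aFold m (by omega)]
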